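-- pv_equiv track=rewrite | github.com/55artix/Python-Projects | hw5/hw5.py | wizards
-- ===== SOURCE A (Python) =====
-- def wizards(grades,life,sleep):
--     wizards_list=[]
--     for Hulk in grades:
--         for Spidey in life:
--             if Hulk==Spidey:
--                 for IronMan in sleep:
--                     if IronMan==Spidey:
--                         wizards_list.append(IronMan)
--     return wizards_list
-- ===== SOURCE B (Python) =====
-- def wizards(grades, life, sleep):
--     life_counts = {}
--     for x in life:
--         life_counts[x] = life_counts.get(x, 0) + 1
--     sleep_counts = {}
--     for x in sleep:
--         sleep_counts[x] = sleep_counts.get(x, 0) + 1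
--     out = []
--     for g in grades:
--         out += [g] * (life_counts.get(g, 0) * sleep_counts.get(g, 0))
--     return out
-- ===== Notes on version B (the rewrite author's own statement) =====
-- stated objective: alternative
-- what changed: Replaces the triple nested scan by two one-pass count dictionaries and list-repetition: each grade contributes count_life(g)*count_sleep(g) copies of itself, with no nested membership scans.
import Mathlib
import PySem

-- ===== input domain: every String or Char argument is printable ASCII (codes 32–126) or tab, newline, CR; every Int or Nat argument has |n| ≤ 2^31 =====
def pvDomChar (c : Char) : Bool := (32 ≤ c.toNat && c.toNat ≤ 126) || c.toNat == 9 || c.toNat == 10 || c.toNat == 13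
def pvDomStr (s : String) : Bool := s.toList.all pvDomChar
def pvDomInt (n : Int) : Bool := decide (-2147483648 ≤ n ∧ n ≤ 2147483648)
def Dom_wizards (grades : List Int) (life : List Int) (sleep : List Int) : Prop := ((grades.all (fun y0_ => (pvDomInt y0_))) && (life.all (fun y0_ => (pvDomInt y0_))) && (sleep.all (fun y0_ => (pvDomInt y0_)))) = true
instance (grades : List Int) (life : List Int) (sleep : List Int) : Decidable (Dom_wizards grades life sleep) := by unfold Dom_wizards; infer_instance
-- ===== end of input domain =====

-- B replaces A's triple nested scan by two one-pass count dictionaries and list-repetition; return values proved equal on all inputs.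

-- ===== PORT A =====
def wizards (grades : List Int) (life : List Int) (sleep : List Int) : List Int :=
  grades.foldl (fun acc hulk =>
    life.foldl (fun acc spidey =>
      if hulk == spidey then
        sleep.foldl (fun acc ironman =>
          if ironman == spidey then acc ++ [ironman] else acc) acc
      else acc) acc) []

-- ===== PORT B =====
def wizards_alt (grades : List Int) (life : List Int) (sleep : List Int) : List Int :=
  let lifeCounts : PySem.Dict Int Int := life.foldl (fun d x => d.insert x (d.getD x 0 + 1)) PySem.Dict.empty
  let sleepCounts : PySem.Dict Int Int := sleep.foldl (fun d x => d.insert x (d.getD x 0 + 1)) PySem.Dict.empty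
  grades.foldl (fun out g =>
    out ++ List.replicate ((lifeCounts.getD g 0 * sleepCounts.getD g 0)).toNat g) []

-- ===== PRECONDITION & SPEC =====
def Spec_wizards (grades : List Int) (life : List Int) (sleep : List Int) (out : List Int) : Prop := out = wizards_alt grades life sleep
instance (grades : List Int) (life : List Int) (sleep : List Int) (out : List Int) : Decidable (Spec_wizards grades life sleep out) := by unfold Spec_wizards; infer_instance

-- ===== CLAIM (what is proved, stated in full; the proofs are below) =====
def Claim_equal_wizards : Prop := ∀ (grades : List Int) (life : List Int) (sleep : List Int), Dom_wizards grades life sleep → Spec_wizards grades life sleep (wizards grades life sleep)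

-- ===== LEMMAS AND PROOFS =====

-- inner sleep loop of A appends sleep.count s copies of s
lemma sleepFold_eq (sleep : List Int) (s : Int) (acc : List Int) :
    sleep.foldl (fun acc i => if i == s then acc ++ [i] else acc) acc
      = acc ++ List.replicate (sleep.count s) s := by
  induction sleep generalizing acc with
  | nil => simp
  | cons x xs ih =>
    simp only [List.foldl_cons, List.count_cons]
    by_cases h : x = s
    · subst h
      rw [if_pos (by simp), ih]
      simp [List.replicate_succ, List.append_assoc]
    · rw [if_neg (by simp [h]), ih]
      simp [beq_iff_eq, h]

-- middle life loop of A appends life.count h * sleep.count h copies of h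
lemma lifeFold_eq (life sleep : List Int) (h : Int) (acc : List Int) :
    life.foldl (fun acc s =>
      if h == s then
        sleep.foldl (fun acc i => if i == s then acc ++ [i] else acc) acc
      else acc) acc
      = acc ++ List.replicate (life.count h * sleep.count h) h := by
  induction life generalizing acc with
  | nil => simp
  | cons x xs ih =>
    simp only [List.foldl_cons, List.count_cons]
    by_cases hx : h = x
    · subst hx
      rw [if_pos (by simp), sleepFold_eq, ih, List.append_assoc, ← List.replicate_add]
      have : sleep.count h + xs.count h * sleep.count h
           = (xs.count h + if h == h then 1 else 0) * sleep.count h := by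
        simp; ring
      rw [this]
    · rw [if_neg (by simpa [beq_iff_eq] using hx), ih]
      simp [beq_iff_eq, Ne.symm hx]

-- B's dict lookups are multiplicities
lemma counts_getD (xs : List Int) (g : Int) :
    (xs.foldl (fun d x => d.insert x (d.getD x 0 + 1)) PySem.Dict.empty).getD g 0
      = (xs.count g : Int) := by
  rw [PySem.Dict.foldl_insert_getD_add_one_eq_counter, PySem.Dict.getD_counter]

-- ===== VERDICT (by name: the statement is the Claim_ definition above) =====
theorem wizards_spec : Claim_equal_wizards := by
  intro grades life sleep hD
  clear hD
  unfold Spec_wizards wizards wizards_alt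
  induction grades using List.reverseRecOn with
  | nil => simp
  | append_singleton gs g ih =>
    simp only [List.foldl_append, List.foldl_cons, List.foldl_nil]
    rw [ih, lifeFold_eq, counts_getD, counts_getD, ← Nat.cast_mul, Int.toNat_natCast]
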